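-- pv_equiv track=rewrite | github.com/nmpogg/CodePTIT | python/ThucHanh1/GhepHinhAC.py | calculate_top_3_volumes
-- ===== SOURCE A (Python) =====
-- import heapq
--
-- def calculate_top_3_volumes(a, b):
--     # Sử dụng heapq để tìm 3 thể tích lớn nhất mà không cần sắp xếp toàn bộ danh sách
--     max_heap = []
--
--     for h in range(1, min(a // 2, b // 2) + 1):
--         V = (a - 2 * h) * (b - 2 * h) * h
--         if len(max_heap) < 3:
--             heapq.heappush(max_heap, V)
--         else:
--             heapq.heappushpop(max_heap, V)
--
--     # Sắp xếp lại 3 giá trị lớn nhất theo thứ tự giảm dần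
--     return sorted(max_heap, reverse=True)
-- ===== SOURCE B (Python) =====
-- def insert_desc(v, xs):
--     # insert v into the descending-sorted list xs, keeping it descending
--     if not xs or v > xs[0]:
--         return [v] + xs
--     return [xs[0]] + insert_desc(v, xs[1:])
--
-- def calculate_top_3_volumes(a, b):
--     # single pass keeping a descending-sorted list of the 3 best volumes
--     top = []
--     for h in range(1, min(a // 2, b // 2) + 1):
--         v = (a - 2 * h) * (b - 2 * h) * h
--         top = insert_desc(v, top)[:3]
--     return top
-- ===== Notes on version B (the rewrite author's own statement) =====
-- stated objective: alternative
-- what changed: Replaces the min-heap (heappush/heappushpop) plus final sort with a single pass that keeps a descending-sorted list of at most 3 volumes via ordered insertion and truncation, so no heap machinery and no final sort.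
import Mathlib
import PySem

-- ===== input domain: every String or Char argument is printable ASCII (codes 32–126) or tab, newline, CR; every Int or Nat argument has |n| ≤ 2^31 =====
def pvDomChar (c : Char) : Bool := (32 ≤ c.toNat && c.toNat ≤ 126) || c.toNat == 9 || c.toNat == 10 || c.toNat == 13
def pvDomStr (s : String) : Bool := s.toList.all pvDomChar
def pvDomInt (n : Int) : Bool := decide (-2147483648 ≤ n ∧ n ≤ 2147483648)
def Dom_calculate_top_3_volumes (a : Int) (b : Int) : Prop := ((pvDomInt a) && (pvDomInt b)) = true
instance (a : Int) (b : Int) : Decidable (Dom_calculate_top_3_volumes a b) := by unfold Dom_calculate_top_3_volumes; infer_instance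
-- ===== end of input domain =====

-- B replaces A's min-heap-of-3 plus final sort by one pass maintaining a descending-sorted
-- list of at most 3 volumes (ordered insertion, then truncation); alternative, same cost.

-- ===== PORT A =====
-- CPython heapq._siftdown(heap, startpos, pos): bubble newitem up towards startpos
def pvSiftdownLoop (heap : List Int) (startpos pos : Nat) (newitem : Int) : List Int :=
  if _h : startpos < pos then
    let parentpos := (pos - 1) / 2
    let parent := heap.getD parentpos 0
    if newitem < parent then
      pvSiftdownLoop (heap.set pos parent) startpos parentpos newitem
    else
      heap.set pos newitem
  else
    heap.set pos newitem
termination_by pos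
decreasing_by omega

def pvSiftdown (heap : List Int) (startpos pos : Nat) : List Int :=
  pvSiftdownLoop heap startpos pos (heap.getD pos 0)

-- CPython heapq._siftup(heap, pos): move root down to a leaf, then _siftdown
def pvSiftupLoop (heap : List Int) (endpos startpos pos : Nat) (newitem : Int) : List Int :=
  if _h : 2 * pos + 1 < endpos then
    let childpos := 2 * pos + 1
    let rightpos := childpos + 1
    let childpos :=
      if rightpos < endpos ∧ ¬ (heap.getD childpos 0 < heap.getD rightpos 0) then rightpos
      else childpos
    pvSiftupLoop (heap.set pos (heap.getD childpos 0)) endpos startpos childpos newitem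
  else
    pvSiftdownLoop (heap.set pos newitem) startpos pos newitem
termination_by endpos - pos
decreasing_by split <;> omega

def pvSiftup (heap : List Int) (pos : Nat) : List Int :=
  pvSiftupLoop heap heap.length pos pos (heap.getD pos 0)

-- heapq.heappush
def pvHeappush (heap : List Int) (item : Int) : List Int :=
  let heap := heap ++ [item]
  pvSiftdown heap 0 (heap.length - 1)

-- heapq.heappushpop; returns (mutated heap, returned item)
def pvHeappushpop (heap : List Int) (item : Int) : List Int × Int :=
  match heap with
  | [] => (heap, item)
  | h0 :: _ =>
    if h0 < item then (pvSiftup (heap.set 0 item) 0, h0)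
    else (heap, item)

def calculate_top_3_volumes (a : Int) (b : Int) : List Int :=
  let max_heap : List Int := []
  let max_heap :=
    (PySem.List.pyRange 1 (min (PySem.Int.floordiv a 2) (PySem.Int.floordiv b 2) + 1) 1).foldl
      (fun max_heap h =>
        let V := (a - 2 * h) * (b - 2 * h) * h
        if max_heap.length < 3 then pvHeappush max_heap V
        else (pvHeappushpop max_heap V).1)
      max_heap
  PySem.List.sorted max_heap (fun x => x) true

-- ===== PORT B =====
def insertDesc (v : Int) (xs : List Int) : List Int :=
  match xs with
  | [] => [v]
  | x :: rest => if v > x then v :: x :: rest else x :: insertDesc v rest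

def calculate_top_3_volumes_alt (a : Int) (b : Int) : List Int :=
  (PySem.List.pyRange 1 (min (PySem.Int.floordiv a 2) (PySem.Int.floordiv b 2) + 1) 1).foldl
    (fun top h =>
      let v := (a - 2 * h) * (b - 2 * h) * h
      PySem.List.slice (insertDesc v top) none (some 3))
    []

-- ===== PRECONDITION & SPEC =====
def Spec_calculate_top_3_volumes (a : Int) (b : Int) (out : List Int) : Prop := out = calculate_top_3_volumes_alt a b
instance (a : Int) (b : Int) (out : List Int) : Decidable (Spec_calculate_top_3_volumes a b out) := by unfold Spec_calculate_top_3_volumes; infer_instance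

-- ===== CLAIM (what is proved, stated in full; the proofs are below) =====
def Claim_equal_calculate_top_3_volumes : Prop := ∀ (a : Int) (b : Int), Dom_calculate_top_3_volumes a b → Spec_calculate_top_3_volumes a b (calculate_top_3_volumes a b)

-- ===== LEMMAS AND PROOFS =====

-- Invariant: A's heap and B's list hold the same ≤3 values; B's is descending, A's root is minimal.
def pvInv (heap acc : List Int) : Prop :=
  (heap = [] ∧ acc = []) ∨
  (∃ x, heap = [x] ∧ acc = [x]) ∨
  (∃ x y, x ≤ y ∧ heap = [x, y] ∧ acc = [y, x]) ∨
  (∃ x y z, x ≤ y ∧ x ≤ z ∧ heap = [x, y, z] ∧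
    acc = if z ≤ y then [y, z, x] else [z, y, x])

theorem pvPushpop3 (x y z v : Int) :
  (pvHeappushpop [x,y,z] v).1 =
    if x < v then
      (if z ≤ y then (if v < z then [v,y,z] else [z,y,v])
       else (if v < y then [v,y,z] else [y,v,z]))
    else [x,y,z] := by
  by_cases h1 : x < v
  · by_cases hzy : z ≤ y
    · by_cases hvz : v < z <;>
        simp [pvHeappushpop, pvSiftup, pvSiftupLoop, pvSiftdownLoop, List.getD, h1, hzy, hvz]
    · by_cases hvy : v < y <;>
        simp [pvHeappushpop, pvSiftup, pvSiftupLoop, pvSiftdownLoop, List.getD, h1, hzy, hvy]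
  · simp [pvHeappushpop, h1]

theorem pvPush2 (x y v : Int) :
  pvHeappush [x,y] v = if v < x then [v,y,x] else [x,y,v] := by
  by_cases hvx : v < x <;>
    simp [pvHeappush, pvSiftdown, pvSiftdownLoop, List.getD, hvx]

theorem pvPush1 (x v : Int) :
  pvHeappush [x] v = if v < x then [v,x] else [x,v] := by
  by_cases hvx : v < x <;>
    simp [pvHeappush, pvSiftdown, pvSiftdownLoop, List.getD, hvx]

theorem pvPush0 (v : Int) : pvHeappush [] v = [v] := by
  simp [pvHeappush, pvSiftdown, pvSiftdownLoop]
theorem pvInv_step (heap acc : List Int) (v : Int) (h : pvInv heap acc) :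
    pvInv (if heap.length < 3 then pvHeappush heap v else (pvHeappushpop heap v).1)
          (PySem.List.slice (insertDesc v acc) none (some 3)) := by
  rcases h with ⟨h1, h2⟩ | ⟨x, h1, h2⟩ | ⟨x, y, hxy, h1, h2⟩ | ⟨x, y, z, hxy, hxz, h1, h2⟩ <;>
    subst h1 <;> subst h2
  · simp [pvPush0, insertDesc, PySem.List.slice]
    exact Or.inr (Or.inl ⟨v, rfl, rfl⟩)
  · by_cases hvx : v < x <;>
      simp [pvPush1, insertDesc, PySem.List.slice, hvx] <;>
      refine Or.inr (Or.inr (Or.inl ?_))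
    · exact ⟨v, x, by omega, by simp [show ¬ x < v by omega]⟩
    · by_cases hgt : x < v
      · exact ⟨x, v, by omega, by simp [hgt]⟩
      · exact ⟨x, v, by omega, by simp [hgt]; omega⟩
  · by_cases hvx : v < x <;>
      simp [pvPush2, insertDesc, PySem.List.slice, hvx] <;>
      refine Or.inr (Or.inr (Or.inr ?_))
    · exact ⟨v, y, x, by omega, by omega,
        by simp [show ¬ y < v by omega, show ¬ x < v by omega, hxy]⟩
    · by_cases hvy : y < v
      · exact ⟨x, y, v, by omega, by omega, by simp [hvy, show ¬ v ≤ y by omega]⟩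
      · by_cases hgt : x < v
        · exact ⟨x, y, v, by omega, by omega,
            by simp [hvy, hgt, show v ≤ y by omega]⟩
        · exact ⟨x, y, v, by omega, by omega,
            by simp [hvy, hgt, show v ≤ y by omega]; omega⟩
  · simp only [List.length_cons, List.length_nil, pvPushpop3]
    norm_num
    by_cases hxv : x < v <;> simp only [hxv, if_true, if_false]
    · by_cases hzy : z ≤ y <;> simp only [hzy, if_true, if_false] <;>
        refine Or.inr (Or.inr (Or.inr ?_))
      · by_cases hvz : v < z <;> simp only [hvz, if_true, if_false]
        · exact ⟨v, y, z, by omega, by omega, rfl,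
            by simp [PySem.List.slice, insertDesc, hzy,
                 show ¬ y < v by omega, show ¬ z < v by omega, show x < v from hxv]⟩
        · by_cases hvy : y < v
          · exact ⟨z, y, v, by omega, by omega, rfl,
              by simp [PySem.List.slice, insertDesc, hvy, show ¬ v ≤ y by omega]⟩
          · refine ⟨z, y, v, by omega, by omega, rfl, ?_⟩
            by_cases hzv : z < v
            · simp [PySem.List.slice, insertDesc, show ¬ y < v by omega, hzv,
                show v ≤ y by omega]
            · have hvz' : v = z := by omega
              subst hvz'
              simp [PySem.List.slice, insertDesc, show ¬ y < v by omega, hxv,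
                show v ≤ y by omega]
      · by_cases hvy : v < y <;> simp only [hvy, if_true, if_false]
        · exact ⟨v, y, z, by omega, by omega, rfl,
            by simp [PySem.List.slice, insertDesc, hzy,
                 show ¬ z < v by omega, show ¬ y < v by omega, hxv]⟩
        · refine ⟨y, v, z, by omega, by omega, rfl, ?_⟩
          by_cases hzv : z < v
          · simp [PySem.List.slice, insertDesc, hzv, show z ≤ v by omega]
          · by_cases hyv : y < v
            · simp [PySem.List.slice, insertDesc, hzv, hyv]
              omega
            · have hvy' : v = y := by omega
              subst hvy'
              simp [PySem.List.slice, insertDesc, hzv, hxv]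
              omega
    · refine Or.inr (Or.inr (Or.inr ⟨x, y, z, hxy, hxz, rfl, ?_⟩))
      by_cases hzy : z ≤ y <;>
        simp [PySem.List.slice, insertDesc, hzy, show ¬ y < v by omega,
          show ¬ z < v by omega, show ¬ x < v by omega]
theorem pvInv_sorted (heap acc : List Int) (h : pvInv heap acc) :
    PySem.List.sorted heap (fun x => x) true = acc := by
  have key : ∀ (l1 l2 : List Int), l1.Perm l2 →
      l1.Pairwise (fun a b => b ≤ a) → l2.Pairwise (fun a b => b ≤ a) → l1 = l2 :=
    fun l1 l2 hp h1 h2 =>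
      PySem.List.eq_of_perm_of_pairwise_le_of_injective (fun t : Int => -t)
        (fun u w huw => by simpa using huw) hp
        (h1.imp (fun hab => by simpa using hab)) (h2.imp (fun hab => by simpa using hab))
  rcases h with ⟨h1, h2⟩ | ⟨x, h1, h2⟩ | ⟨x, y, hxy, h1, h2⟩ | ⟨x, y, z, hxy, hxz, h1, h2⟩ <;>
    subst h1 <;> subst h2
  · rfl
  · exact key _ _ (PySem.List.sorted_perm _ _ _) (PySem.List.sorted_pairwise_rev _ _) (by simp)
  · exact key _ _ ((PySem.List.sorted_perm _ _ _).trans (List.Perm.swap y x []))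
      (PySem.List.sorted_pairwise_rev _ _) (by simp [hxy])
  · apply key
    · refine (PySem.List.sorted_perm _ _ _).trans ?_
      split_ifs
      · exact (List.Perm.swap y x [z]).trans (List.Perm.cons y (List.Perm.swap z x []))
      · exact ((List.Perm.swap y x [z]).trans (List.Perm.cons y (List.Perm.swap z x []))).trans
          (List.Perm.swap z y [x])
    · exact PySem.List.sorted_pairwise_rev _ _
    · split_ifs <;> simp <;> omega

theorem pvInv_fold (l : List Int) (f : Int → Int) (heap acc : List Int) (h : pvInv heap acc) :
    pvInv (l.foldl (fun hp x =>
            if hp.length < 3 then pvHeappush hp (f x) else (pvHeappushpop hp (f x)).1) heap)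
          (l.foldl (fun tp x => PySem.List.slice (insertDesc (f x) tp) none (some 3)) acc) := by
  induction l generalizing heap acc with
  | nil => exact h
  | cons x xs ih => exact ih _ _ (pvInv_step heap acc (f x) h)

-- ===== VERDICT (by name: the statement is the Claim_ definition above) =====
theorem calculate_top_3_volumes_spec : Claim_equal_calculate_top_3_volumes := by
  intro a b _
  unfold Spec_calculate_top_3_volumes calculate_top_3_volumes calculate_top_3_volumes_alt
  exact pvInv_sorted _ _
    (pvInv_fold _ (fun h => (a - 2 * h) * (b - 2 * h) * h) [] [] (Or.inl ⟨rfl, rfl⟩))
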